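-- pv_equiv track=rewrite | github.com/vijaykarki/Wordle | Wordle.py | generateEncoding
-- ===== SOURCE A (Python) =====
-- def generateEncoding(single_string, string_list):
--
--     result_list = []
--     for i_word in range(len(string_list)):
--         result_list.append([])
--         current_word = string_list[i_word]
--         for char_word in range(len(current_word)):
--             result = 0
--             for ch in range(len(single_string)):
--                 if current_word[char_word] == single_string[ch]:
--                     result = 1
--             result_list[-1].append(result)
--
--     for i_word in range(len(string_list)):
--         current_word = string_list[i_word]
--         for char_word in range(len(current_word)):
--             if (current_word[char_word] == single_string[char_word]):
--                 result_list[i_word][char_word] = 2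
--
--     return result_list
-- ===== SOURCE B (Python) =====
-- def generateEncoding(single_string, string_list):
--     # One pass: build each word's row cell-by-cell (2 exact, 1 present, 0 absent).
--     return [
--         [2 if w[j] == single_string[j]
--          else (1 if w[j] in single_string else 0)
--          for j in range(len(w))]
--         for w in string_list
--     ]
-- ===== Notes on version B (the rewrite author's own statement) =====
-- stated objective: faster
-- what changed: Replaces A's two-pass build (an inner interpreted scan of single_string per character to mark presence, then a second pass over all words overwriting exact matches with 2) by a single comprehension whose cells are decided directly as 2/1/0 using the C-level 'in' membership test.
import Mathlib
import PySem

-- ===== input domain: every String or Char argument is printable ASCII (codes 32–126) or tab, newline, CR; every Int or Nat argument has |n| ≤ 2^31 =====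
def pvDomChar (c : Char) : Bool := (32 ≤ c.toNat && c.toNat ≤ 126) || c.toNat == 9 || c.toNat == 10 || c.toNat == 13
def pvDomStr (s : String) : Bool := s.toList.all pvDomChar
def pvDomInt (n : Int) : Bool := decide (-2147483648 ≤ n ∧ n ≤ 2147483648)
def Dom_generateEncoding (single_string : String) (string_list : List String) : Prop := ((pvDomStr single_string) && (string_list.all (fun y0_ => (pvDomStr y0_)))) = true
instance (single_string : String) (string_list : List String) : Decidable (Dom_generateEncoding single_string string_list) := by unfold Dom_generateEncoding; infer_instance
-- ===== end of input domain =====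

-- B is a one-pass rewrite: each cell is decided directly as 2/1/0, instead of A's
-- presence pass (inner scan of single_string) followed by a second overwrite pass.

-- ===== PORT A =====
-- Pass 1: for every word, for every character, scan single_string setting result := 1 on a match.
-- Pass 2: for every word i and position j, overwrite cell j with 2 when word[j] == single_string[j]
-- (Python indexes single_string[j] directly and raises IndexError if j is out of range;
--  Pre_ excludes exactly those inputs, so the getD default is never reached there).
def generateEncoding (single_string : String) (string_list : List String) : List (List Int) :=
  let pass1 : List (List Int) :=
    string_list.map (fun w =>
      w.toList.map (fun c =>
        single_string.toList.foldl (fun r ch => if c = ch then (1 : Int) else r) 0))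
  (List.zip string_list pass1).map (fun p =>
    (List.range p.1.toList.length).foldl
      (fun row j =>
        if p.1.toList.getD j ' ' = single_string.toList.getD j ' ' then row.set j 2 else row)
      p.2)

-- ===== PORT B =====
def generateEncoding_alt (single_string : String) (string_list : List String) : List (List Int) :=
  string_list.map (fun w =>
    (List.range w.toList.length).map (fun j =>
      if w.toList.getD j ' ' = single_string.toList.getD j ' ' then (2 : Int)
      else if w.toList.getD j ' ' ∈ single_string.toList then 1 else 0))

-- ===== PRECONDITION & SPEC =====
-- Pre_ excludes exactly the inputs on which the Python A raises IndexError
-- (a word longer than single_string makes pass 2 index single_string out of range).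
def Pre_generateEncoding (single_string : String) (string_list : List String) : Prop :=
  ∀ w ∈ string_list, w.toList.length ≤ single_string.toList.length
instance (single_string : String) (string_list : List String) : Decidable (Pre_generateEncoding single_string string_list) := by unfold Pre_generateEncoding; infer_instance
def pvWitness_generateEncoding : String × List String := ("crane", ["crane", "cab", "xyz"])

def Spec_generateEncoding (single_string : String) (string_list : List String) (out : List (List Int)) : Prop := out = generateEncoding_alt single_string string_list
instance (single_string : String) (string_list : List String) (out : List (List Int)) : Decidable (Spec_generateEncoding single_string string_list out) := by unfold Spec_generateEncoding; infer_instance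

-- ===== CLAIM (what is proved, stated in full; the proofs are below) =====
def Claim_equal_generateEncoding : Prop := ∀ (single_string : String) (string_list : List String), Dom_generateEncoding single_string string_list → Pre_generateEncoding single_string string_list → Spec_generateEncoding single_string string_list (generateEncoding single_string string_list)

-- ===== LEMMAS AND PROOFS =====

-- Pass 1's inner scan computes presence: 1 if the char occurs in l, else the start value.
theorem pv_foldl_presence (c : Char) (l : List Char) (r : Int) :
    l.foldl (fun r ch => if c = ch then (1 : Int) else r) r
      = if c ∈ l then 1 else r := by
  induction l generalizing r with
  | nil => simp
  | cons a t ih =>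
    simp only [List.foldl_cons, ih, List.mem_cons]
    by_cases h : c = a <;> by_cases h2 : c ∈ t <;> simp [h, h2]

-- The set-fold of pass 2 preserves list length.
theorem pv_fold_set_length (P : Nat → Prop) [DecidablePred P] (idxs : List Nat) (row : List Int) :
    (idxs.foldl (fun r j => if P j then r.set j 2 else r) row).length = row.length := by
  induction idxs generalizing row with
  | nil => rfl
  | cons a t ih =>
    simp only [List.foldl_cons]
    by_cases h : P a <;> simp [h, ih]

-- Characterisation of pass 2: cell k of the folded result (Option form, no dependent proofs).
theorem pv_fold_set_getElem? (P : Nat → Prop) [DecidablePred P] (n : Nat) (row : List Int)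
    (k : Nat) (hk : k < row.length) :
    ((List.range n).foldl (fun r j => if P j then r.set j 2 else r) row)[k]?
      = some (if k < n ∧ P k then 2 else row[k]) := by
  induction n with
  | zero => simp [List.getElem?_eq_getElem hk]
  | succ m ih =>
    rw [List.range_succ, List.foldl_append]
    simp only [List.foldl_cons, List.foldl_nil]
    by_cases hP : P m
    · rw [if_pos hP, List.getElem?_set]
      by_cases hm : m = k
      · subst hm
        simp [pv_fold_set_length, hk, hP]
      · simp only [hm, if_false, ih]
        have h3 : (k < m ∧ P k) = (k < m + 1 ∧ P k) := by
          apply propext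
          constructor
          · rintro ⟨h4, h5⟩; exact ⟨Nat.lt_succ_of_lt h4, h5⟩
          · rintro ⟨h4, h5⟩; exact ⟨by omega, h5⟩
        exact congrArg some (if_congr (iff_of_eq h3) rfl rfl)
    · rw [if_neg hP, ih]
      by_cases hkm : k < m
      · simp [hkm, Nat.lt_succ_of_lt hkm]
      · have h1 : ¬ (k < m ∧ P k) := by tauto
        by_cases hkm1 : k < m + 1
        · have : k = m := by omega
          subst this
          simp [hP]
        · simp [h1, hkm1]

-- Per-word agreement: pass 2 applied to pass 1's row for w equals B's row for w.
theorem pv_row_eq (s : String) (w : String)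
    (_hw : w.toList.length ≤ s.toList.length) :
    (List.range w.toList.length).foldl
      (fun row j =>
        if w.toList.getD j ' ' = s.toList.getD j ' ' then row.set j 2 else row)
      (w.toList.map (fun c => s.toList.foldl (fun r ch => if c = ch then (1 : Int) else r) 0))
    = (List.range w.toList.length).map (fun j =>
        if w.toList.getD j ' ' = s.toList.getD j ' ' then (2 : Int)
        else if w.toList.getD j ' ' ∈ s.toList then 1 else 0) := by
  set row : List Int := w.toList.map (fun c => s.toList.foldl (fun r ch => if c = ch then (1 : Int) else r) 0) with hrow
  have hrl : row.length = w.toList.length := by simp [hrow]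
  apply List.ext_getElem?
  intro k
  by_cases hkn : k < w.toList.length
  · rw [pv_fold_set_getElem? (fun j => w.toList.getD j ' ' = s.toList.getD j ' ')
        w.toList.length row k (hrl ▸ hkn)]
    rw [List.getElem?_map, List.getElem?_range hkn]
    have hget : w.toList.getD k ' ' = w.toList[k] := by
      rw [List.getD_eq_getElem?_getD, List.getElem?_eq_getElem hkn]; rfl
    have hrk : row[k]'(hrl ▸ hkn) = if w.toList[k] ∈ s.toList then (1 : Int) else 0 := by
      simp only [hrow, List.getElem_map]
      rw [pv_foldl_presence]
    rw [Option.map_some]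
    by_cases heq : w.toList.getD k ' ' = s.toList.getD k ' '
    · exact congrArg some (by rw [if_pos ⟨hkn, heq⟩, if_pos heq])
    · have h1 : ¬ (k < w.toList.length ∧ w.toList.getD k ' ' = s.toList.getD k ' ') := by tauto
      refine congrArg some ?_
      rw [if_neg h1, if_neg heq, hrk, hget]
  · have h1 : ((List.range w.toList.length).foldl
        (fun r j => if w.toList.getD j ' ' = s.toList.getD j ' ' then r.set j 2 else r) row).length ≤ k := by
      rw [pv_fold_set_length (fun j => w.toList.getD j ' ' = s.toList.getD j ' '), hrl]
      omega
    rw [List.getElem?_eq_none h1, List.getElem?_eq_none (by simpa using Nat.le_of_not_lt hkn)]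

-- Lifting per-word agreement through the zip-with-pass1 traversal of A.
theorem pv_zip_map (s : String) (sl : List String)
    (hpre : ∀ w ∈ sl, w.toList.length ≤ s.toList.length) :
    (List.zip sl (sl.map (fun w =>
        w.toList.map (fun c => s.toList.foldl (fun r ch => if c = ch then (1 : Int) else r) 0)))).map
      (fun p => (List.range p.1.toList.length).foldl
        (fun row j => if p.1.toList.getD j ' ' = s.toList.getD j ' ' then row.set j 2 else row) p.2)
    = sl.map (fun w => (List.range w.toList.length).map (fun j =>
        if w.toList.getD j ' ' = s.toList.getD j ' ' then (2 : Int)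
        else if w.toList.getD j ' ' ∈ s.toList then 1 else 0)) := by
  induction sl with
  | nil => rfl
  | cons w t ih =>
    simp only [List.map_cons, List.zip_cons_cons, List.map_cons]
    refine congrArg₂ _ ?_ (ih (fun x hx => hpre x (List.mem_cons_of_mem _ hx)))
    exact pv_row_eq s w (hpre w (List.mem_cons_self ..))

-- ===== VERDICT (by name: the statement is the Claim_ definition above) =====
theorem generateEncoding_spec : Claim_equal_generateEncoding := by
  intro s sl _ hpre
  unfold Spec_generateEncoding generateEncoding generateEncoding_alt
  exact pv_zip_map s sl hpre
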